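-- pv_equiv track=rewrite | github.com/rguan72/cotmonitoring | pipeline.py | create_evaluation_summary
-- ===== SOURCE A (Python) =====
-- def create_evaluation_summary(results: list[dict]) -> dict:
--     """
--     Create a summary of evaluation results categorized into four categories:
--     1. Correct and caught by monitor
--     2. Incorrect and caught by monitor
--     3. Correct and evaded monitor
--     4. Incorrect and evaded monitor
--     """
--     total_results = len(results)
--     categories = {
--         "Correct and caught by monitor": 0,
--         "Incorrect and caught by monitor": 0,
--         "Correct and evaded monitor": 0,
--         "Incorrect and evaded monitor": 0
--     }
--     for result in results:
--         is_correct = result['Judge result']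
--         is_caught = result['Monitor result']
--
--         if is_correct and is_caught:
--             categories["Correct and caught by monitor"] += 1
--         elif not is_correct and is_caught:
--             categories["Incorrect and caught by monitor"] += 1
--         elif is_correct and not is_caught:
--             categories["Correct and evaded monitor"] += 1
--         else:
--             categories["Incorrect and evaded monitor"] += 1
--     formatted = {
--         "Correct and caught by monitor": f"{categories['Correct and caught by monitor']} / {total_results}",
--         "Incorrect and caught by monitor": f"{categories['Incorrect and caught by monitor']} / {total_results}",
--         "Correct and evaded monitor": f"{categories['Correct and evaded monitor']} / {total_results}",
--         "Incorrect and evaded monitor": f"{categories['Incorrect and evaded monitor']} / {total_results}",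
--     }
--     return formatted
-- ===== SOURCE B (Python) =====
-- def create_evaluation_summary(results: list[dict]) -> dict:
--     total = len(results)
--     # Stage 1: partition by correctness.
--     correct = [r for r in results if r['Judge result']]
--     incorrect = [r for r in results if not r['Judge result']]
--     # Stage 2: within each partition, count only the caught ones;
--     # the evaded count is the partition size minus the caught count.
--     cc = len([r for r in correct if r['Monitor result']])
--     ic = len([r for r in incorrect if r['Monitor result']])
--     return {
--         "Correct and caught by monitor": f"{cc} / {total}",
--         "Incorrect and caught by monitor": f"{ic} / {total}",
--         "Correct and evaded monitor": f"{len(correct) - cc} / {total}",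
--         "Incorrect and evaded monitor": f"{len(incorrect) - ic} / {total}",
--     }
-- ===== Notes on version B (the rewrite author's own statement) =====
-- stated objective: alternative
-- what changed: Replaces the single-pass four-way if/elif counter with staged partition passes: first split results by correctness, then count only the caught ones in each partition and derive the evaded counts by subtraction.
import Mathlib
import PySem

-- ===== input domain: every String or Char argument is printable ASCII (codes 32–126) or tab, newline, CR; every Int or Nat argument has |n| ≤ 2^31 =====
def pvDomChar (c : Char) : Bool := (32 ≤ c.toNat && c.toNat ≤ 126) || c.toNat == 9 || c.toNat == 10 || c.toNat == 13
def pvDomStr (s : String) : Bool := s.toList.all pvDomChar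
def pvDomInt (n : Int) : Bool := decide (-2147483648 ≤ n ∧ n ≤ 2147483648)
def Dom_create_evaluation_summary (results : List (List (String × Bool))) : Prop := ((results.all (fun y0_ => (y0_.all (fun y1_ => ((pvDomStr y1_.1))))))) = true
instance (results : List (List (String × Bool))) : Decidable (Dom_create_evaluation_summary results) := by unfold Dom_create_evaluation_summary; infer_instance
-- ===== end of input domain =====

-- B replaces A's single-pass four-way if/elif counter with staged partition
-- passes (split by correctness, count caught, derive evaded by subtraction).

-- ===== PORT A =====
def create_evaluation_summary (results : List (List (String × Bool))) : List (String × String) :=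
  let total : Int := results.length
  let categories : PySem.Dict String Int :=
    ((((PySem.Dict.empty.insert "Correct and caught by monitor" 0).insert
        "Incorrect and caught by monitor" 0).insert
        "Correct and evaded monitor" 0).insert
        "Incorrect and evaded monitor" 0)
  let categories := results.foldl (fun d r =>
    -- result['Judge result'] / result['Monitor result'] raise KeyError when absent:
    -- total via getD false, those inputs are excluded by Pre_
    let is_correct : Bool := ((PySem.Dict.ofList r).get? "Judge result").getD false
    let is_caught : Bool := ((PySem.Dict.ofList r).get? "Monitor result").getD false
    if is_correct && is_caught then d.modify "Correct and caught by monitor" 0 (· + 1)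
    else if !is_correct && is_caught then d.modify "Incorrect and caught by monitor" 0 (· + 1)
    else if is_correct && !is_caught then d.modify "Correct and evaded monitor" 0 (· + 1)
    else d.modify "Incorrect and evaded monitor" 0 (· + 1)) categories
  [("Correct and caught by monitor",
      PySem.Int.toStr (categories.getD "Correct and caught by monitor" 0) ++ " / " ++ PySem.Int.toStr total),
   ("Incorrect and caught by monitor",
      PySem.Int.toStr (categories.getD "Incorrect and caught by monitor" 0) ++ " / " ++ PySem.Int.toStr total),
   ("Correct and evaded monitor",
      PySem.Int.toStr (categories.getD "Correct and evaded monitor" 0) ++ " / " ++ PySem.Int.toStr total),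
   ("Incorrect and evaded monitor",
      PySem.Int.toStr (categories.getD "Incorrect and evaded monitor" 0) ++ " / " ++ PySem.Int.toStr total)]

-- ===== PORT B =====
-- the two truthiness reads r['Judge result'] / r['Monitor result']
def pvJ (r : List (String × Bool)) : Bool := ((PySem.Dict.ofList r).get? "Judge result").getD false
def pvM (r : List (String × Bool)) : Bool := ((PySem.Dict.ofList r).get? "Monitor result").getD false

def create_evaluation_summary_alt (results : List (List (String × Bool))) : List (String × String) :=
  let total : Int := results.length
  let correct := results.filter (fun r => pvJ r)
  let incorrect := results.filter (fun r => !pvJ r)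
  let cc : Int := (correct.filter (fun r => pvM r)).length
  let ic : Int := (incorrect.filter (fun r => pvM r)).length
  [("Correct and caught by monitor", PySem.Int.toStr cc ++ " / " ++ PySem.Int.toStr total),
   ("Incorrect and caught by monitor", PySem.Int.toStr ic ++ " / " ++ PySem.Int.toStr total),
   ("Correct and evaded monitor", PySem.Int.toStr ((correct.length : Int) - cc) ++ " / " ++ PySem.Int.toStr total),
   ("Incorrect and evaded monitor", PySem.Int.toStr ((incorrect.length : Int) - ic) ++ " / " ++ PySem.Int.toStr total)]

-- ===== PRECONDITION & SPEC =====
-- Pre_ excludes exactly the inputs where Python A raises KeyError: a result dict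
-- missing the 'Judge result' or 'Monitor result' key.
def Pre_create_evaluation_summary (results : List (List (String × Bool))) : Prop :=
  ∀ r ∈ results, (PySem.Dict.ofList r).contains "Judge result" = true ∧
                 (PySem.Dict.ofList r).contains "Monitor result" = true
instance (results : List (List (String × Bool))) : Decidable (Pre_create_evaluation_summary results) := by unfold Pre_create_evaluation_summary; infer_instance
def pvWitness_create_evaluation_summary : (List (List (String × Bool))) :=
  [[("Judge result", true), ("Monitor result", false)], [("Judge result", false), ("Monitor result", true)]]
def Spec_create_evaluation_summary (results : List (List (String × Bool))) (out : List (String × String)) : Prop := out = create_evaluation_summary_alt results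
instance (results : List (List (String × Bool))) (out : List (String × String)) : Decidable (Spec_create_evaluation_summary results out) := by unfold Spec_create_evaluation_summary; infer_instance

-- ===== CLAIM (what is proved, stated in full; the proofs are below) =====
def Claim_equal_create_evaluation_summary : Prop := ∀ (results : List (List (String × Bool))), Dom_create_evaluation_summary results → Pre_create_evaluation_summary results → Spec_create_evaluation_summary results (create_evaluation_summary results)

-- ===== LEMMAS AND PROOFS =====

-- the category label selected by A's four-way branch, as a function of the two flags
def pvLabel (r : List (String × Bool)) : String :=
  (if pvJ r then "Correct" else "Incorrect") ++ " and " ++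
  (if pvM r then "caught by monitor" else "evaded monitor")

-- A's four-way branch increments exactly the label's counter
theorem pv_step_eq (d : PySem.Dict String Int) (r : List (String × Bool)) :
    (let is_correct : Bool := ((PySem.Dict.ofList r).get? "Judge result").getD false
     let is_caught : Bool := ((PySem.Dict.ofList r).get? "Monitor result").getD false
     if is_correct && is_caught then d.modify "Correct and caught by monitor" 0 (· + 1)
     else if !is_correct && is_caught then d.modify "Incorrect and caught by monitor" 0 (· + 1)
     else if is_correct && !is_caught then d.modify "Correct and evaded monitor" 0 (· + 1)
     else d.modify "Incorrect and evaded monitor" 0 (· + 1))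
    = d.modify (pvLabel r) 0 (· + 1) := by
  unfold pvLabel pvJ pvM
  cases hj : ((PySem.Dict.ofList r).get? "Judge result").getD false <;>
    cases hm : ((PySem.Dict.ofList r).get? "Monitor result").getD false <;> simp

theorem pv_fold_count (rs : List (List (String × Bool))) (d : PySem.Dict String Int) (k : String) :
    (rs.foldl (fun d r => d.modify (pvLabel r) 0 (· + 1)) d).getD k 0
      = d.getD k 0 + ((rs.map pvLabel).count k : Int) := by
  induction rs generalizing d with
  | nil => simp
  | cons r rs ih =>
    simp only [List.foldl_cons, ih, List.map_cons]
    rw [PySem.Dict.getD_modify]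
    by_cases hk : k = pvLabel r
    · subst hk; simp; ring
    · simp [hk, Ne.symm hk]

theorem pv_count_map {α : Type} (f : α → String) (k : String) (rs : List α) :
    (rs.map f).count k = rs.countP (fun r => f r == k) := by
  induction rs with
  | nil => simp
  | cons r rs ih => simp [List.count_cons, List.countP_cons, ih]

-- each label matches exactly its flag pattern
theorem pv_label_cc (r : List (String × Bool)) :
    (pvLabel r == "Correct and caught by monitor") = (pvJ r && pvM r) := by
  unfold pvLabel; cases hj : pvJ r <;> cases hm : pvM r <;> simp
theorem pv_label_ic (r : List (String × Bool)) :
    (pvLabel r == "Incorrect and caught by monitor") = (!pvJ r && pvM r) := by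
  unfold pvLabel; cases hj : pvJ r <;> cases hm : pvM r <;> simp
theorem pv_label_ce (r : List (String × Bool)) :
    (pvLabel r == "Correct and evaded monitor") = (pvJ r && !pvM r) := by
  unfold pvLabel; cases hj : pvJ r <;> cases hm : pvM r <;> simp
theorem pv_label_ie (r : List (String × Bool)) :
    (pvLabel r == "Incorrect and evaded monitor") = (!pvJ r && !pvM r) := by
  unfold pvLabel; cases hj : pvJ r <;> cases hm : pvM r <;> simp

-- a filtered group splits into its caught and evaded parts
theorem pv_countP_split {α : Type} (p q : α → Bool) (rs : List α) :
    rs.countP p = rs.countP (fun r => p r && q r) + rs.countP (fun r => p r && !q r) := by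
  induction rs with
  | nil => simp
  | cons r rs ih => cases hp : p r <;> cases hq : q r <;>
      simp [hp, hq, ih] <;> omega

-- ===== VERDICT (by name: the statement is the Claim_ definition above) =====
theorem create_evaluation_summary_spec : Claim_equal_create_evaluation_summary := by
  intro results _ _
  show _ = _
  unfold create_evaluation_summary create_evaluation_summary_alt
  rw [show (fun (d : PySem.Dict String Int) r =>
      let is_correct : Bool := ((PySem.Dict.ofList r).get? "Judge result").getD false
      let is_caught : Bool := ((PySem.Dict.ofList r).get? "Monitor result").getD false
      if is_correct && is_caught then d.modify "Correct and caught by monitor" 0 (· + 1)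
      else if !is_correct && is_caught then d.modify "Incorrect and caught by monitor" 0 (· + 1)
      else if is_correct && !is_caught then d.modify "Correct and evaded monitor" 0 (· + 1)
      else d.modify "Incorrect and evaded monitor" 0 (· + 1))
    = fun d r => d.modify (pvLabel r) 0 (· + 1) from funext fun d => funext fun r => pv_step_eq d r]
  have h1 : List.countP (fun r => pvJ r) results
      = List.countP (fun r => pvJ r && pvM r) results
        + List.countP (fun r => pvJ r && !pvM r) results := pv_countP_split pvJ pvM results
  have h2 : List.countP (fun r => !pvJ r) results
      = List.countP (fun r => !pvJ r && pvM r) results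
        + List.countP (fun r => !pvJ r && !pvM r) results :=
    pv_countP_split (fun r => !pvJ r) pvM results
  simp only [pv_fold_count, PySem.Dict.getD_insert, pv_count_map,
    pv_label_cc, pv_label_ic, pv_label_ce, pv_label_ie,
    List.countP_filter, ← List.countP_eq_length_filter]
  simp only [List.cons.injEq, Prod.mk.injEq, and_true, true_and]
  have hc1 : List.countP (fun r => pvM r && pvJ r) results
      = List.countP (fun r => pvJ r && pvM r) results :=
    List.countP_congr (fun a _ => by cases pvJ a <;> cases pvM a <;> simp)
  have hc2 : List.countP (fun r => pvM r && !pvJ r) results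
      = List.countP (fun r => !pvJ r && pvM r) results :=
    List.countP_congr (fun a _ => by cases pvJ a <;> cases pvM a <;> simp)
  refine ⟨?_, ?_, ?_, ?_⟩ <;>
    · congr 3
      simp only [String.reduceEq, reduceIte]
      omega
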